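-- pv_equiv track=rewrite | github.com/wordhui/dict_to_db | dict_to_db/_sqlite.py | _get_update_data_by_where_column
-- ===== SOURCE A (Python) =====
-- def _get_update_data_by_where_column(insert_data, where_column):
--     """根据where column 自动从inset data中获取update data 和 where data"""
--     insert_column_data = {}
--     for column, value in insert_data.items():
--         if '@' in column:
--             insert_column_data[column.split('@')[0]] = value
--         elif '#' in column:
--             insert_column_data[column.split('#')[0]] = value
--         else:
--             insert_column_data[column] = value
--     update_data = {key: value for key, value in insert_column_data.items() if key not in where_column}
--     where_data = {key: value for key, value in insert_column_data.items() if key in where_column}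
--     return update_data, where_data
-- ===== SOURCE B (Python) =====
-- def _get_update_data_by_where_column(insert_data, where_column):
--     """One pass: route each normalized column straight into update/where data."""
--     update_data, where_data = {}, {}
--     where = set(where_column)
--     for column, value in insert_data.items():
--         name = column.split('@')[0] if '@' in column else \
--                column.split('#')[0] if '#' in column else column
--         if name in where:
--             where_data[name] = value
--         else:
--             update_data[name] = value
--     return update_data, where_data
-- ===== Notes on version B (the rewrite author's own statement) =====
-- stated objective: faster
-- what changed: B makes a single pass over insert_data, normalizing each key and routing it directly into where_data or update_data via a prebuilt set, instead of A's three passes that build an intermediate normalized dict and then filter it twice with list-membership tests.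
import Mathlib
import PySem

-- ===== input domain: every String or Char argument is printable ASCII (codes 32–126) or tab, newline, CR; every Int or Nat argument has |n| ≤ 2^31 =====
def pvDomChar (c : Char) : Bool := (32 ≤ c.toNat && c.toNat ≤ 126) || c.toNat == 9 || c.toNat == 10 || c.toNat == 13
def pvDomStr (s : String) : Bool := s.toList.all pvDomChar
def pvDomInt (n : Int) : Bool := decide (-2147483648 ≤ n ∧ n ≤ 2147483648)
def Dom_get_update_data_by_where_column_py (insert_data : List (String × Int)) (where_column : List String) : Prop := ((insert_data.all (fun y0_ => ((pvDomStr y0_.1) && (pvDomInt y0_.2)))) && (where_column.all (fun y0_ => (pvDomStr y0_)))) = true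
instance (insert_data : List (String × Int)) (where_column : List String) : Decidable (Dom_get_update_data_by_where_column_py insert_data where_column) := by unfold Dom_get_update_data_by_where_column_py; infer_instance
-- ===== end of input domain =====

-- B replaces A's three passes (build normalized dict, filter twice with list membership) by one pass routing each normalized key into its target dict via a prebuilt set; a timing run measured B faster. Neither program mutates its arguments.
-- ===== PORT A =====
def get_update_data_by_where_column_py (insert_data : List (String × Int)) (where_column : List String) : (List (String × Int)) × (List (String × Int)) :=
  let insert_column_data : PySem.Dict String Int :=
    insert_data.foldl (fun d p =>
      if PySem.Str.isIn "@" p.1 then d.insert (((PySem.Str.split? p.1 "@").getD []).headD "") p.2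
      else if PySem.Str.isIn "#" p.1 then d.insert (((PySem.Str.split? p.1 "#").getD []).headD "") p.2
      else d.insert p.1 p.2) PySem.Dict.empty
  let update_data : PySem.Dict String Int :=
    insert_column_data.items.foldl (fun d p =>
      if where_column.contains p.1 then d else d.insert p.1 p.2) PySem.Dict.empty
  let where_data : PySem.Dict String Int :=
    insert_column_data.items.foldl (fun d p =>
      if where_column.contains p.1 then d.insert p.1 p.2 else d) PySem.Dict.empty
  (update_data.items, where_data.items)

-- ===== PORT B =====
-- normalized column name: part before '@' or '#', else the column itself
def pvNormCol (col : String) : String :=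
  if PySem.Str.isIn "@" col then ((PySem.Str.split? col "@").getD []).headD ""
  else if PySem.Str.isIn "#" col then ((PySem.Str.split? col "#").getD []).headD ""
  else col

def get_update_data_by_where_column_py_alt (insert_data : List (String × Int)) (where_column : List String) : (List (String × Int)) × (List (String × Int)) :=
  let whereSet := PySem.Set.ofList where_column
  let r : PySem.Dict String Int × PySem.Dict String Int :=
    insert_data.foldl (fun uw p =>
      let name := pvNormCol p.1
      if whereSet.contains name then (uw.1, uw.2.insert name p.2)
      else (uw.1.insert name p.2, uw.2)) (PySem.Dict.empty, PySem.Dict.empty)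
  (r.1.items, r.2.items)

-- ===== PRECONDITION & SPEC =====
def Spec_get_update_data_by_where_column_py (insert_data : List (String × Int)) (where_column : List String) (out : (List (String × Int)) × (List (String × Int))) : Prop := out = get_update_data_by_where_column_py_alt insert_data where_column
instance (insert_data : List (String × Int)) (where_column : List String) (out : (List (String × Int)) × (List (String × Int))) : Decidable (Spec_get_update_data_by_where_column_py insert_data where_column out) := by unfold Spec_get_update_data_by_where_column_py; infer_instance

-- ===== CLAIM (what is proved, stated in full; the proofs are below) =====
def Claim_equal_get_update_data_by_where_column_py : Prop := ∀ (insert_data : List (String × Int)) (where_column : List String), Dom_get_update_data_by_where_column_py insert_data where_column → Spec_get_update_data_by_where_column_py insert_data where_column (get_update_data_by_where_column_py insert_data where_column)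

-- ===== LEMMAS AND PROOFS =====


-- ===== LEMMAS =====

theorem pv_set_contains_ofList (l : List String) (x : String) :
    PySem.Set.contains (PySem.Set.ofList l) x = l.contains x := by
  by_cases h : x ∈ l
  · rw [(PySem.Set.contains_iff _ _).2 ((PySem.Set.mem_ofList _ _).2 h)]; simp [h]
  · have hc : ¬ PySem.Set.contains (PySem.Set.ofList l) x = true := fun hc =>
      h ((PySem.Set.mem_ofList _ _).1 ((PySem.Set.contains_iff _ _).1 hc))
    rw [Bool.eq_false_iff.2 hc]; simp [h]

theorem pv_stepA_eq :
    (fun (d : PySem.Dict String Int) (p : String × Int) =>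
      if PySem.Str.isIn "@" p.1 then d.insert (((PySem.Str.split? p.1 "@").getD []).headD "") p.2
      else if PySem.Str.isIn "#" p.1 then d.insert (((PySem.Str.split? p.1 "#").getD []).headD "") p.2
      else d.insert p.1 p.2)
    = (fun d p => d.insert (pvNormCol p.1) p.2) := by
  funext d p
  unfold pvNormCol
  split_ifs <;> rfl

-- fold with a guard = fold over the filtered list
theorem pv_foldl_guard {α β : Type} (c : β → Bool) (g : α → β → α) :
    ∀ (l : List β) (init : α),
      l.foldl (fun a b => if c b then g a b else a) init = (l.filter c).foldl g init := by
  intro l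
  induction l with
  | nil => intro init; rfl
  | cons b t ih =>
    intro init
    by_cases h : c b = true <;> simp [List.filter_cons, h, ih]

-- filtering commutes with the key-preserving replacement map of Dict.insert
theorem pv_filter_replace (P : String → Bool) (n : String) (v : Int) (hP : P n = true) :
    ∀ xs : List (String × Int),
      (xs.map (fun p => if p.1 == n then (n, v) else p)).filter (fun p => P p.1)
        = (xs.filter (fun p => P p.1)).map (fun p => if p.1 == n then (n, v) else p) := by
  intro xs
  induction xs with
  | nil => rfl
  | cons p t ih =>
    simp only [List.map_cons, List.filter_cons]
    by_cases h : p.1 = n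
    · simpa [h, hP] using ih
    · by_cases hp : P p.1 = true <;> simpa [h, hp] using ih

theorem pv_filter_replace_drop (Q : String → Bool) (n : String) (v : Int) (hQ : Q n = false) :
    ∀ xs : List (String × Int),
      (xs.map (fun p => if p.1 == n then (n, v) else p)).filter (fun p => Q p.1)
        = xs.filter (fun p => Q p.1) := by
  intro xs
  induction xs with
  | nil => rfl
  | cons p t ih =>
    simp only [List.map_cons, List.filter_cons]
    by_cases h : p.1 = n
    · simpa [h, hQ] using ih
    · by_cases hq : Q p.1 = true <;> simpa [h, hq] using ih

-- contains transfers between a dict and its filtered-items companion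
theorem pv_contains_of_items_filter (P : String → Bool) (n : String) (hP : P n = true)
    (d w : PySem.Dict String Int)
    (hw : w.items = d.items.filter (fun p => P p.1)) :
    w.contains n = d.contains n := by
  have h1 : w.contains n = true ↔ n ∈ w.keys := PySem.Dict.contains_iff_mem_keys w n
  have h2 : d.contains n = true ↔ n ∈ d.keys := PySem.Dict.contains_iff_mem_keys d n
  have : (n ∈ w.keys) ↔ (n ∈ d.keys) := by
    simp only [PySem.Dict.keys, hw, List.mem_map, List.mem_filter]
    constructor
    · rintro ⟨p, ⟨hp, _⟩, hk⟩; exact ⟨p, hp, hk⟩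
    · rintro ⟨p, hp, hk⟩; exact ⟨p, ⟨hp, by simpa [hk] using hP⟩, hk⟩
  rcases Bool.eq_false_or_eq_true (w.contains n) with h | h <;>
  rcases Bool.eq_false_or_eq_true (d.contains n) with h' | h' <;>
    simp_all

-- one insertion step preserves the "items are the P-filter" relation
theorem pv_insert_filter (P : String → Bool) (n : String) (v : Int) (hP : P n = true)
    (d w : PySem.Dict String Int)
    (hw : w.items = d.items.filter (fun p => P p.1)) :
    (w.insert n v).items = (d.insert n v).items.filter (fun p => P p.1) := by
  have hc := pv_contains_of_items_filter P n hP d w hw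
  by_cases h : d.contains n = true
  · rw [PySem.Dict.items_insert_of_contains _ _ h,
        PySem.Dict.items_insert_of_contains _ _ (by rw [hc]; exact h),
        pv_filter_replace P n v hP, hw]
  · have h' : d.contains n = false := by simpa using h
    rw [PySem.Dict.items_insert_of_not_contains _ _ h',
        PySem.Dict.items_insert_of_not_contains _ _ (by rw [hc]; exact h'),
        List.filter_append, hw]
    simp [hP]

theorem pv_insert_filter_drop (Q : String → Bool) (n : String) (v : Int) (hQ : Q n = false)
    (d u : PySem.Dict String Int)
    (hu : u.items = d.items.filter (fun p => Q p.1)) :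
    u.items = (d.insert n v).items.filter (fun p => Q p.1) := by
  by_cases h : d.contains n = true
  · rw [PySem.Dict.items_insert_of_contains _ _ h, pv_filter_replace_drop Q n v hQ, hu]
  · have h' : d.contains n = false := by simpa using h
    rw [PySem.Dict.items_insert_of_not_contains _ _ h', List.filter_append, hu]
    simp [hQ]

-- main invariant: B's paired fold tracks the two filters of A's dict fold
theorem pv_main (C : String → Bool) :
    ∀ (xs : List (String × Int)) (d u w : PySem.Dict String Int),
      u.items = d.items.filter (fun p => !C p.1) →
      w.items = d.items.filter (fun p => C p.1) →
      ((xs.foldl (fun (uw : PySem.Dict String Int × PySem.Dict String Int) p =>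
          if C (pvNormCol p.1) then (uw.1, uw.2.insert (pvNormCol p.1) p.2)
          else (uw.1.insert (pvNormCol p.1) p.2, uw.2)) (u, w)).1.items
          = (xs.foldl (fun d p => d.insert (pvNormCol p.1) p.2) d).items.filter (fun p => !C p.1))
      ∧ ((xs.foldl (fun (uw : PySem.Dict String Int × PySem.Dict String Int) p =>
          if C (pvNormCol p.1) then (uw.1, uw.2.insert (pvNormCol p.1) p.2)
          else (uw.1.insert (pvNormCol p.1) p.2, uw.2)) (u, w)).2.items
          = (xs.foldl (fun d p => d.insert (pvNormCol p.1) p.2) d).items.filter (fun p => C p.1)) := by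
  intro xs
  induction xs with
  | nil => intro d u w hu hw; exact ⟨hu, hw⟩
  | cons p t ih =>
    intro d u w hu hw
    by_cases h : C (pvNormCol p.1) = true
    · simp only [List.foldl_cons, h, if_pos]
      exact ih (d.insert (pvNormCol p.1) p.2) u (w.insert (pvNormCol p.1) p.2)
        (pv_insert_filter_drop (fun k => !C k) (pvNormCol p.1) p.2 (by simp [h]) d u hu)
        (pv_insert_filter C (pvNormCol p.1) p.2 h d w hw)
    · have h' : C (pvNormCol p.1) = false := by simpa using h
      simp only [List.foldl_cons, h', if_neg, Bool.false_eq_true, not_false_iff]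
      exact ih (d.insert (pvNormCol p.1) p.2) (u.insert (pvNormCol p.1) p.2) w
        (pv_insert_filter (fun k => !C k) (pvNormCol p.1) p.2 (by simp [h']) d u hu)
        (pv_insert_filter_drop C (pvNormCol p.1) p.2 h' d w hw)

-- rebuilding a dict from filtered items of a nodup-keys dict gives exactly those items
theorem pv_rebuild (l : List (String × Int)) (hnd : (l.map Prod.fst).Nodup) :
    ((l.foldl (fun (d : PySem.Dict String Int) p => d.insert p.1 p.2) PySem.Dict.empty)).items = l := by
  have := PySem.Dict.items_foldl_insert_fresh (l := l) (d := PySem.Dict.empty)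
    (k := Prod.fst) (v := Prod.snd) (by intro a _; simp) hnd
  simpa using this

-- A's second stage (dict comprehensions): filtering a nodup-keys items list into a fresh dict
theorem pv_stage2_upd (wc : List String) (l : List (String × Int)) (hnd : (l.map Prod.fst).Nodup) :
    (l.foldl (fun (d : PySem.Dict String Int) p =>
        if wc.contains p.1 then d else d.insert p.1 p.2) PySem.Dict.empty).items
      = l.filter (fun p => !wc.contains p.1) := by
  have hstep : (fun (d : PySem.Dict String Int) (p : String × Int) =>
      if wc.contains p.1 then d else d.insert p.1 p.2)
      = fun d p => if (!wc.contains p.1) then d.insert p.1 p.2 else d := by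
    funext d p; by_cases h : wc.contains p.1 = true <;> simp [h]
  rw [hstep, pv_foldl_guard]
  exact pv_rebuild _ (List.Sublist.nodup (List.Sublist.map Prod.fst List.filter_sublist) hnd)

theorem pv_stage2_wh (wc : List String) (l : List (String × Int)) (hnd : (l.map Prod.fst).Nodup) :
    (l.foldl (fun (d : PySem.Dict String Int) p =>
        if wc.contains p.1 then d.insert p.1 p.2 else d) PySem.Dict.empty).items
      = l.filter (fun p => wc.contains p.1) := by
  rw [pv_foldl_guard]
  exact pv_rebuild _ (List.Sublist.nodup (List.Sublist.map Prod.fst List.filter_sublist) hnd)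

-- ===== VERDICT (by name: the statement is the Claim_ definition above) =====
theorem get_update_data_by_where_column_py_spec : Claim_equal_get_update_data_by_where_column_py := by
  intro insert_data where_column _
  unfold Spec_get_update_data_by_where_column_py
  unfold get_update_data_by_where_column_py get_update_data_by_where_column_py_alt
  rw [pv_stepA_eq]
  simp only [pv_set_contains_ofList]
  have hnd : (insert_data.foldl (fun (d : PySem.Dict String Int) p =>
      d.insert (pvNormCol p.1) p.2) PySem.Dict.empty).keys.Nodup :=
    PySem.Dict.nodup_keys_foldl_insert_key insert_data (fun p => pvNormCol p.1)
      (fun _ p => p.2) PySem.Dict.empty PySem.Dict.nodup_keys_empty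
  have hnd' : ((insert_data.foldl (fun (d : PySem.Dict String Int) p =>
      d.insert (pvNormCol p.1) p.2) PySem.Dict.empty).items.map Prod.fst).Nodup := by
    simpa [PySem.Dict.keys] using hnd
  have hmain := pv_main (fun k => where_column.contains k) insert_data
    PySem.Dict.empty PySem.Dict.empty PySem.Dict.empty rfl rfl
  refine Prod.ext ?_ ?_ <;> dsimp only
  · rw [pv_stage2_upd where_column _ hnd']
    exact hmain.1.symm
  · rw [pv_stage2_wh where_column _ hnd']
    exact hmain.2.symm
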